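-- pv_equiv track=rewrite | github.com/JamesMcDougallJr/CodingChallenges | Python/nonRepeatingConcat/main.py | numNonRepeatingConcats
-- ===== SOURCE A (Python) =====
-- def numNonRepeatingConcats(lst):
--   concatenations = []
--   for s1 in range(len(lst)):
--     for s2 in range(s1+1, len(lst)):
--       concatenations.append(lst[s1]+lst[s2])
--       concatenations.append(lst[s2]+lst[s1])
--
--   numValid = 0
--   validConcats = []
--   for concatenation in concatenations:
--     if noRepeats(concatenation):
--       numValid += 1
--       validConcats.append(concatenation)
--   return validConcats
--
-- def noRepeats(string):
--   chars = {}
--   for char in string: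
--     if char in chars:
--       return False
--     else:
--       chars[char] = True
--   return True
-- ===== SOURCE B (Python) =====
-- def numNonRepeatingConcats(lst):
--     # Precompute per string: (its character set, whether it is internally duplicate-free).
--     info = [(set(s), len(set(s)) == len(s)) for s in lst]
--     result = []
--     for i in range(len(lst)):
--         ci, oki = info[i]
--         for j in range(i + 1, len(lst)):
--             cj, okj = info[j]
--             if oki and okj and ci.isdisjoint(cj):
--                 result.append(lst[i] + lst[j])
--                 result.append(lst[j] + lst[i])
--     return result
-- ===== Notes on version B (the rewrite author's own statement) =====
-- stated objective: faster
-- what changed: Instead of materialising every pair concatenation and re-scanning each concatenated string character by character with a dict, B precomputes each input string's character set and duplicate-freeness once, then decides each pair by a set-disjointness test and emits both concatenations directly.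
import Mathlib
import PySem

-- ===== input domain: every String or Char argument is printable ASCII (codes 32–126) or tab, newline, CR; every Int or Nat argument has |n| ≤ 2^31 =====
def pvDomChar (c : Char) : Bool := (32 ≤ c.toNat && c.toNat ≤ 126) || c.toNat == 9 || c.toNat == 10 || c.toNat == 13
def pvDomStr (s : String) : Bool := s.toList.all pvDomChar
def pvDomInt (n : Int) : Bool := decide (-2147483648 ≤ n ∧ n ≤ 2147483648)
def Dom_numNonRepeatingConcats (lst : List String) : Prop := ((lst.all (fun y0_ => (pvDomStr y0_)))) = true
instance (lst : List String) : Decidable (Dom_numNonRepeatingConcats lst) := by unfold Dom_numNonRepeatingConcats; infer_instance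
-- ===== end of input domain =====

-- B replaces A's build-all-concatenations-then-rescan-each-string pass by a per-string
-- precomputation (character set + duplicate-freeness) and a per-pair disjointness test.

-- ===== PORT A =====
-- helper noRepeats: dict-based scan of the string's characters
def noRepeatsGo (chars : PySem.Dict Char Bool) : List Char → Bool
  | [] => true
  | c :: rest =>
      if PySem.Dict.contains chars c then false
      else noRepeatsGo (chars.insert c true) rest

def noRepeats (string : String) : Bool := noRepeatsGo PySem.Dict.empty string.toList

def numNonRepeatingConcats (lst : List String) : List String :=
  let concatenations : List String :=
    (PySem.List.pyRange 0 (lst.length : Int) 1).foldl (fun acc s1 =>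
      (PySem.List.pyRange (s1 + 1) (lst.length : Int) 1).foldl (fun acc s2 =>
        (acc ++ [PySem.List.pyGetD lst s1 "" ++ PySem.List.pyGetD lst s2 ""])
             ++ [PySem.List.pyGetD lst s2 "" ++ PySem.List.pyGetD lst s1 ""]) acc) []
  -- numValid is computed by A but never returned; the fold carries it faithfully
  let st : Int × List String :=
    concatenations.foldl (fun p c =>
      if noRepeats c then (p.1 + 1, p.2 ++ [c]) else p) (0, [])
  st.2

-- ===== PORT B =====
def cleanInfo (s : String) : PySem.Set Char × Bool :=
  (PySem.Set.ofList s.toList,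
   PySem.Set.len (PySem.Set.ofList s.toList) == PySem.Str.len s)

def numNonRepeatingConcats_alt (lst : List String) : List String :=
  let info := lst.map cleanInfo
  (PySem.List.pyRange 0 (lst.length : Int) 1).foldl (fun res i =>
    let pi := PySem.List.pyGetD info i (PySem.Set.empty, false)
    (PySem.List.pyRange (i + 1) (lst.length : Int) 1).foldl (fun res j =>
      let pj := PySem.List.pyGetD info j (PySem.Set.empty, false)
      if pi.2 && pj.2 && PySem.Set.isdisjoint pi.1 pj.1 then
        (res ++ [PySem.List.pyGetD lst i "" ++ PySem.List.pyGetD lst j ""])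
             ++ [PySem.List.pyGetD lst j "" ++ PySem.List.pyGetD lst i ""]
      else res) res) []

-- ===== PRECONDITION & SPEC =====
def Spec_numNonRepeatingConcats (lst : List String) (out : List String) : Prop := out = numNonRepeatingConcats_alt lst
instance (lst : List String) (out : List String) : Decidable (Spec_numNonRepeatingConcats lst out) := by unfold Spec_numNonRepeatingConcats; infer_instance

-- ===== CLAIM (what is proved, stated in full; the proofs are below) =====
def Claim_equal_numNonRepeatingConcats : Prop := ∀ (lst : List String), Dom_numNonRepeatingConcats lst → Spec_numNonRepeatingConcats lst (numNonRepeatingConcats lst)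

-- ===== LEMMAS AND PROOFS =====

-- noRepeatsGo characterised: true iff the remaining chars are distinct and none is already recorded
theorem noRepeatsGo_iff (cs : List Char) : ∀ (d : PySem.Dict Char Bool),
    noRepeatsGo d cs = true ↔ cs.Nodup ∧ ∀ c ∈ cs, d.contains c = false := by
  induction cs with
  | nil => intro d; simp [noRepeatsGo]
  | cons c rest ih =>
      intro d
      rw [noRepeatsGo]
      by_cases h : PySem.Dict.contains d c = true
      · simp only [h, if_true]
        constructor
        · intro hfalse; cases hfalse
        · rintro ⟨-, hall⟩
          have := hall c (List.mem_cons_self ..)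
          rw [h] at this; cases this
      · rw [if_neg h, ih]
        simp only [List.nodup_cons, List.mem_cons, Bool.not_eq_true] at *
        constructor
        · rintro ⟨hnd, hall⟩
          have hmem : c ∉ rest := by
            intro hc
            have := hall c hc
            rw [PySem.Dict.contains_insert] at this
            simp at this
          refine ⟨⟨hmem, hnd⟩, ?_⟩
          rintro x (rfl | hx)
          · exact h
          · have := hall x hx
            rw [PySem.Dict.contains_insert] at this
            simp only [Bool.or_eq_false_iff] at this
            exact this.2
        · rintro ⟨⟨hcr, hnd⟩, hall⟩
          refine ⟨hnd, ?_⟩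
          intro x hx
          rw [PySem.Dict.contains_insert]
          simp only [Bool.or_eq_false_iff]
          refine ⟨?_, hall x (Or.inr hx)⟩
          simp only [beq_eq_false_iff_ne, ne_eq]
          rintro rfl; exact hcr hx

theorem noRepeats_iff (s : String) : noRepeats s = true ↔ s.toList.Nodup := by
  rw [noRepeats, noRepeatsGo_iff]
  simp [PySem.Dict.contains_empty]

-- length bound for foldl Set.add
theorem foldl_add_length_le (cs : List Char) : ∀ (acc : PySem.Set Char),
    (cs.foldl PySem.Set.add acc).length ≤ acc.length + cs.length := by
  induction cs with
  | nil => intro acc; simp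
  | cons c rest ih =>
      intro acc
      simp only [List.foldl_cons, List.length_cons]
      refine le_trans (ih _) ?_
      have : (PySem.Set.add acc c).length ≤ acc.length + 1 := by
        unfold PySem.Set.add; split <;> simp
      omega

theorem foldl_add_length_eq_iff (cs : List Char) : ∀ (acc : PySem.Set Char),
    (cs.foldl PySem.Set.add acc).length = acc.length + cs.length ↔
      cs.Nodup ∧ ∀ c ∈ cs, c ∉ acc := by
  induction cs with
  | nil => intro acc; simp
  | cons c rest ih =>
      intro acc
      simp only [List.foldl_cons, List.length_cons, List.nodup_cons, List.mem_cons]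
      by_cases h : c ∈ acc
      · have hadd : PySem.Set.add acc c = acc := by
          unfold PySem.Set.add
          rw [if_pos]
          simpa [PySem.Set.contains] using h
        rw [hadd]
        constructor
        · intro hlen
          exfalso
          have := foldl_add_length_le rest acc
          omega
        · rintro ⟨-, hall⟩
          exact absurd h (hall c (Or.inl rfl))
      · have hadd : PySem.Set.add acc c = acc ++ [c] := by
          unfold PySem.Set.add
          rw [if_neg]
          simpa [PySem.Set.contains] using h
        rw [hadd]
        have key := ih (acc ++ [c])
        simp only [List.length_append, List.length_cons, List.length_nil] at key
        constructor
        · intro hlen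
          obtain ⟨hnd, hall⟩ := key.mp (by omega)
          refine ⟨⟨?_, hnd⟩, ?_⟩
          · intro hc
            have := hall c hc
            simp at this
          · rintro x (rfl | hx)
            · exact h
            · have := hall x hx
              simp only [List.mem_append, List.mem_cons, List.not_mem_nil, or_false,
                not_or] at this
              exact this.1
        · rintro ⟨⟨hcr, hnd⟩, hall⟩
          have : (rest.foldl PySem.Set.add (acc ++ [c])).length = acc.length + (0 + 1) + rest.length := by
            apply key.mpr
            refine ⟨hnd, ?_⟩
            intro x hx
            simp only [List.mem_append, List.mem_cons, List.not_mem_nil, or_false, not_or]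
            exact ⟨hall x (Or.inr hx), fun hxc => hcr (hxc ▸ hx)⟩
          omega

-- B's duplicate-freeness flag is Nodup
theorem clean_iff (s : String) :
    (PySem.Set.len (PySem.Set.ofList s.toList) == PySem.Str.len s) = true ↔ s.toList.Nodup := by
  rw [PySem.Set.ofList_eq_foldl]
  have key := foldl_add_length_eq_iff s.toList []
  simp only [List.length_nil, Nat.zero_add, List.not_mem_nil, not_false_iff, implies_true,
    and_true] at key
  rw [PySem.Set.len, PySem.Str.len, beq_iff_eq, Nat.cast_inj]
  simpa using key

-- B's disjointness flag is list disjointness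
theorem isdisjoint_iff (s t : String) :
    PySem.Set.isdisjoint (PySem.Set.ofList s.toList) (PySem.Set.ofList t.toList) = true ↔
      ∀ c ∈ s.toList, c ∉ t.toList := by
  simp only [PySem.Set.isdisjoint, PySem.Set.contains, Bool.not_eq_eq_eq_not, Bool.not_true,
    List.any_eq_false, List.contains_eq_mem]
  constructor
  · intro h c hc
    have := h c ((PySem.Set.mem_ofList _ _).mpr hc)
    simpa [PySem.Set.mem_ofList] using this
  · intro h c hc
    simp only [PySem.Set.mem_ofList] at hc ⊢
    simpa [PySem.Set.mem_ofList] using h c hc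

-- the central fact: A's per-concatenation test equals B's per-pair test
theorem noRepeats_append (s t : String) :
    noRepeats (s ++ t) = ((cleanInfo s).2 && (cleanInfo t).2 &&
      PySem.Set.isdisjoint (cleanInfo s).1 (cleanInfo t).1) := by
  rw [Bool.eq_iff_iff]
  simp only [cleanInfo, Bool.and_eq_true, noRepeats_iff, String.toList_append,
    List.nodup_append, clean_iff, isdisjoint_iff]
  constructor
  · rintro ⟨h1, h2, h3⟩
    exact ⟨⟨h1, h2⟩, fun c hc hct => h3 c hc c hct rfl⟩
  · rintro ⟨⟨h1, h2⟩, h3⟩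
    exact ⟨h1, h2, fun a ha b hb hab => h3 a ha (hab ▸ hb)⟩

-- both orders of one pair pass or fail A's test together, matching B's single test
theorem pair_block (s t : String) :
    List.filter noRepeats [s ++ t, t ++ s] =
      (if ((cleanInfo s).2 && (cleanInfo t).2 &&
           PySem.Set.isdisjoint (cleanInfo s).1 (cleanInfo t).1) then
        [s ++ t, t ++ s] else []) := by
  have hsym : ((cleanInfo t).2 && (cleanInfo s).2 &&
      PySem.Set.isdisjoint (cleanInfo t).1 (cleanInfo s).1) =
      ((cleanInfo s).2 && (cleanInfo t).2 &&
      PySem.Set.isdisjoint (cleanInfo s).1 (cleanInfo t).1) := by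
    rw [Bool.eq_iff_iff]
    simp only [cleanInfo, Bool.and_eq_true, isdisjoint_iff]
    constructor
    · rintro ⟨⟨ht, hs⟩, hd⟩
      exact ⟨⟨hs, ht⟩, fun c hc hct => hd c hct hc⟩
    · rintro ⟨⟨hs, ht⟩, hd⟩
      exact ⟨⟨ht, hs⟩, fun c hc hcs => hd c hcs hc⟩
  by_cases h : ((cleanInfo s).2 && (cleanInfo t).2 &&
      PySem.Set.isdisjoint (cleanInfo s).1 (cleanInfo t).1) = true
  · simp [List.filter, noRepeats_append, hsym, h]
  · simp only [Bool.not_eq_true] at h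
    simp [List.filter, noRepeats_append, hsym, h]

-- A's counting filter fold: the second component is the plain filter
theorem snd_count_filter_foldl (l : List String) : ∀ (n : Int) (acc : List String),
    (l.foldl (fun p c => if noRepeats c then (p.1 + 1, p.2 ++ [c]) else p) (n, acc)).2 =
      acc ++ l.filter noRepeats := by
  induction l with
  | nil => intro n acc; simp
  | cons c rest ih =>
      intro n acc
      by_cases h : noRepeats c = true <;>
        simp [List.foldl_cons, h, ih]

-- pushing the conditional append out of B's accumulator
theorem ite_append_empty {α} (c : Bool) (res l : List α) :
    (if c then res ++ l else res) = res ++ (if c then l else []) := by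
  cases c <;> simp

-- ===== VERDICT (by name: the statement is the Claim_ definition above) =====
theorem numNonRepeatingConcats_spec : Claim_equal_numNonRepeatingConcats := by
  intro lst _
  show numNonRepeatingConcats lst = numNonRepeatingConcats_alt lst
  unfold numNonRepeatingConcats numNonRepeatingConcats_alt
  simp only [List.append_assoc, List.singleton_append,
    PySem.List.foldl_append_eq_flatMap, snd_count_filter_foldl, List.nil_append,
    List.filter_flatMap]
  simp only [ite_append_empty, PySem.List.foldl_append_eq_flatMap, List.nil_append]
  refine List.flatMap_congr ?_
  intro i hi
  rw [PySem.List.mem_pyRange_one] at hi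
  refine List.flatMap_congr ?_
  intro j hj
  rw [PySem.List.mem_pyRange_one] at hj
  rw [PySem.List.pyGetD_eq_getElem (List.map cleanInfo lst) (d := (PySem.Set.empty, false)) hi.1
        (by simpa using hi.2),
      PySem.List.pyGetD_eq_getElem (List.map cleanInfo lst) (d := (PySem.Set.empty, false))
        (by omega : (0:Int) ≤ j) (by simpa using hj.2),
      List.getElem_map, List.getElem_map,
      PySem.List.pyGetD_eq_getElem lst (d := "") hi.1 (by simpa using hi.2),
      PySem.List.pyGetD_eq_getElem lst (d := "") (by omega : (0:Int) ≤ j) (by simpa using hj.2)]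
  exact pair_block _ _
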